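-- pv_equiv track=rewrite | github.com/SleepCloudMX/CubePatterns | patterns.py | find_runs
-- ===== SOURCE A (Python) =====
-- def find_runs(cells: list[bool]) -> list[list[int]]:
--     cols: list[list[int]] = []
--     for col_idx, active in enumerate(cells, 2):
--         if not active:
--             continue
--         if cols and cols[-1][1] == col_idx - 1:
--             cols[-1][1] = col_idx
--         else:
--             cols.append([col_idx, col_idx])
--     return cols
-- ===== SOURCE B (Python) =====
-- def find_runs(cells: list[bool]) -> list[list[int]]:
--     prev = [False] + cells[:-1]
--     nxt = cells[1:] + [False]
--     starts = [i for i, (c, p) in enumerate(zip(cells, prev), 2) if c and not p]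
--     ends = [i for i, (c, q) in enumerate(zip(cells, nxt), 2) if c and not q]
--     return [[s, e] for s, e in zip(starts, ends)]
-- ===== Notes on version B (the rewrite author's own statement) =====
-- stated objective: alternative
-- what changed: B detects run boundaries by zipping cells with shifted copies of itself - a start is an active cell whose predecessor is inactive, an end one whose successor is inactive - and zips the start list with the end list into [start,end] pairs, instead of A's stateful single pass that extends the last run's end in place.
import Mathlib
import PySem

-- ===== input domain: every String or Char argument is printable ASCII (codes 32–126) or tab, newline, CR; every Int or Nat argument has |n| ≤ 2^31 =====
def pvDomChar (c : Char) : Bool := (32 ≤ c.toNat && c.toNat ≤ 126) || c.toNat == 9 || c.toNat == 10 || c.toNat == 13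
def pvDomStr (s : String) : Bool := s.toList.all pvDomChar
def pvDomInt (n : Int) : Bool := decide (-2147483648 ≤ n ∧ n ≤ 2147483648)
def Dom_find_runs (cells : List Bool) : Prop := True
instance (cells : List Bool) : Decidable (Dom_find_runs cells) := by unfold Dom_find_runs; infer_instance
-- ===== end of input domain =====

-- B finds run starts and ends by boundary detection on shifted copies of cells and zips them, instead of A's stateful pass; same result, alternative algorithm.

-- ===== PORT A =====
-- one loop-body step of A for an active cell at column i: extend the last run or append [i, i]
def pvStepA (cols : List (List Int)) (i : Int) : List (List Int) :=
  match cols.getLast? with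
  | some run =>
      if (PySem.List.pyGet? run 1).getD 0 = i - 1 then
        cols.dropLast ++ [[(PySem.List.pyGet? run 0).getD 0, i]]
      else
        cols ++ [[i, i]]
  | none => cols ++ [[i, i]]

-- A's 'for col_idx, active in enumerate(cells, 2)' loop
def pvLoopA (cells : List Bool) (i : Int) (cols : List (List Int)) : List (List Int) :=
  match cells with
  | [] => cols
  | active :: rest => pvLoopA rest (i + 1) (if active then pvStepA cols i else cols)

def find_runs (cells : List Bool) : List (List Int) := pvLoopA cells 2 []

-- ===== PORT B =====
-- the comprehension '[i for i, (c, p) in enumerate(zip(cells, shifted), 2) if c and not p]'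
def pvSel (pairs : List (Bool × Bool)) (i : Int) : List Int :=
  match pairs with
  | [] => []
  | (c, p) :: rest => if c && !p then i :: pvSel rest (i + 1) else pvSel rest (i + 1)

-- '[False] + cells[:-1]' (cells[:-1] is dropLast for any list, exact)
def pvPrevList (cells : List Bool) : List Bool := false :: cells.dropLast

-- 'cells[1:] + [False]'
def pvNextList (cells : List Bool) : List Bool := cells.drop 1 ++ [false]

def find_runs_alt (cells : List Bool) : List (List Int) :=
  ((pvSel (cells.zip (pvPrevList cells)) 2).zip (pvSel (cells.zip (pvNextList cells)) 2)).map
    (fun p => [p.1, p.2])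

-- ===== PRECONDITION & SPEC =====
def Spec_find_runs (cells : List Bool) (out : List (List Int)) : Prop := out = find_runs_alt cells
instance (cells : List Bool) (out : List (List Int)) : Decidable (Spec_find_runs cells out) := by unfold Spec_find_runs; infer_instance

-- ===== CLAIM (what is proved, stated in full; the proofs are below) =====
def Claim_equal_find_runs : Prop := ∀ (cells : List Bool), Dom_find_runs cells → Spec_find_runs cells (find_runs cells)

-- ===== LEMMAS AND PROOFS =====

-- proof helpers: the 'starts' pass with the incoming previous flag p, the 'ends' pass, and zip-into-pairs
def pvW (xs : List Bool) (p : Bool) (i : Int) : List Int := pvSel (xs.zip (p :: xs.dropLast)) i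
def pvE (xs : List Bool) (i : Int) : List Int := pvSel (xs.zip (xs.drop 1 ++ [false])) i
def pvZM (a b : List Int) : List (List Int) := (a.zip b).map (fun p => [p.1, p.2])
-- the last run (if any) already closed before column i
def pvClosed (runs : List (List Int)) (i : Int) : Prop :=
  ∀ r ∈ runs.getLast?, (PySem.List.pyGet? r 1).getD 0 < i - 1

theorem pvW_cons (c : Bool) (rest : List Bool) (p : Bool) (i : Int) :
    pvW (c :: rest) p i = (if c && !p then [i] else []) ++ pvW rest c (i + 1) := by
  cases rest <;> simp [pvW, pvSel] <;> split <;> simp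

theorem pvE_cons (c : Bool) (rest : List Bool) (i : Int) :
    pvE (c :: rest) i = (if c && !(rest.headD false) then [i] else []) ++ pvE rest (i + 1) := by
  cases rest <;> simp [pvE, pvSel] <;> split <;> simp

theorem pvZM_cons (a b : Int) (as bs : List Int) :
    pvZM (a :: as) (b :: bs) = [a, b] :: pvZM as bs := by simp [pvZM]

theorem pvMain (cells : List Bool) :
    (∀ (i : Int) (runs : List (List Int)), pvClosed runs i →
       pvLoopA cells i runs = runs ++ pvZM (pvW cells false i) (pvE cells i)) ∧
    (∀ (i : Int) (runs : List (List Int)) (s : Int),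
       pvLoopA cells i (runs ++ [[s, i - 1]]) =
         runs ++ pvZM (s :: pvW cells true i) (pvE (true :: cells) (i - 1))) := by
  induction cells with
  | nil =>
    constructor
    · intro i runs _; simp [pvLoopA, pvW, pvE, pvSel, pvZM]
    · intro i runs s
      simp [pvLoopA, pvW, pvE, pvSel, pvZM]
  | cons c rest ih =>
    have h1 : ∀ s p : Int, (PySem.List.pyGet? [s, p] 1).getD 0 = p := by
      intro s p; simp [PySem.List.pyGet?, PySem.List.pyIdx?]
    have h0 : ∀ s p : Int, (PySem.List.pyGet? [s, p] 0).getD 0 = s := by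
      intro s p; simp [PySem.List.pyGet?, PySem.List.pyIdx?]
    constructor
    · intro i runs hcl
      cases c with
      | false =>
        have hcl' : pvClosed runs (i + 1) := by
          intro r hr; have := hcl r hr; omega
        simp only [pvLoopA, Bool.false_eq_true, if_false]
        rw [(ih).1 (i + 1) runs hcl', pvW_cons, pvE_cons]
        simp
      | true =>
        simp only [pvLoopA, if_true]
        have hstep : pvStepA runs i = runs ++ [[i, i]] := by
          unfold pvStepA
          cases hr : runs.getLast? with
          | none => rfl
          | some r =>
            have hlt := hcl r (by simp [hr])
            show (if (PySem.List.pyGet? r 1).getD 0 = i - 1 then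
                    runs.dropLast ++ [[(PySem.List.pyGet? r 0).getD 0, i]]
                  else runs ++ [[i, i]]) = runs ++ [[i, i]]
            rw [if_neg (by omega)]
        rw [hstep]
        have hi : i + 1 - 1 = i := by omega
        have h2 := (ih).2 (i + 1) runs i
        rw [hi] at h2
        rw [h2]
        simp [pvW_cons, pvE_cons]
    · intro i runs s
      cases c with
      | false =>
        simp only [pvLoopA, Bool.false_eq_true, if_false]
        have hcl' : pvClosed (runs ++ [[s, i - 1]]) (i + 1) := by
          intro r hr
          simp at hr
          subst hr; rw [h1]; omega
        rw [(ih).1 (i + 1) (runs ++ [[s, i - 1]]) hcl']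
        have hi1 : i - 1 + 1 = i := by omega
        simp [pvW_cons, pvE_cons, pvZM_cons, hi1]
      | true =>
        simp only [pvLoopA, if_true]
        have hstep : pvStepA (runs ++ [[s, i - 1]]) i = runs ++ [[s, i]] := by
          unfold pvStepA
          rw [List.getLast?_concat]
          simp
        rw [hstep]
        have hi : i + 1 - 1 = i := by omega
        have h2 := (ih).2 (i + 1) runs s
        rw [hi] at h2
        rw [h2]
        have hi1 : i - 1 + 1 = i := by omega
        simp [pvW_cons, pvE_cons, hi1]

-- ===== VERDICT (by name: the statement is the Claim_ definition above) =====
theorem find_runs_spec : Claim_equal_find_runs := by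
  intro cells _
  unfold Spec_find_runs find_runs find_runs_alt
  have := (pvMain cells).1 2 [] (by intro r hr; simp at hr)
  simpa [pvW, pvE, pvZM, pvPrevList, pvNextList] using this
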